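-- pv_equiv track=rewrite | github.com/lawrencez02/crimtech-comp-f20 | python/rm_smallest.py | rm_smallest
-- ===== SOURCE A (Python) =====
-- def rm_smallest(d):
--     if not bool(d):
--         return d
--     counter = True
--
--     for key, value in d.items():
--         if(counter):
--             minvalue = value
--             minkey = key
--             counter = False
--         if(value < minvalue):
--             minvalue = value
--             minkey = key
--     d.pop(minkey)
--
--     return d
-- ===== SOURCE B (Python) =====
-- def rm_smallest(d):
--     if not bool(d):
--         return d
--     minkey = sorted(d.items(), key=lambda kv: kv[1])[0][0]
--     d.pop(minkey)
--     return d
-- ===== Notes on version B (the rewrite author's own statement) =====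
-- stated objective: simpler
-- what changed: Replaces the hand-written counter/min-tracking loop with a stable sort by value and popping the first key of the sorted items (stability reproduces A's keep-first tie rule).
import Mathlib
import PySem

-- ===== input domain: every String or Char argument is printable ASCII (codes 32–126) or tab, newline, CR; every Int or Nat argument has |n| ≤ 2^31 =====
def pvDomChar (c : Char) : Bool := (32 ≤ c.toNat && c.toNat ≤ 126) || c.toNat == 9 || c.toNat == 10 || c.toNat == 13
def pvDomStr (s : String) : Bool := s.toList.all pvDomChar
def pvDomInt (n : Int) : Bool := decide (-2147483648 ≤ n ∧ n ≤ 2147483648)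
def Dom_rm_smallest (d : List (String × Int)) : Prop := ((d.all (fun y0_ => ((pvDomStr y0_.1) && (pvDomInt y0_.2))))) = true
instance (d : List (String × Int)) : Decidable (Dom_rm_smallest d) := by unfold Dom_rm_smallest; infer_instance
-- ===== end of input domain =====

-- B removes the min-value entry by a stable sort on values instead of A's counter/min-tracking loop
-- (objective: simpler). Both Pythons mutate d in place (d.pop); the theorem is about the returned dict's entries.

-- d.pop(k) on the dict: remove the (unique) entry with key k (first match on the association list).
def pyDictPop (d : List (String × Int)) (k : String) : List (String × Int) :=
  d.eraseP (fun kv => kv.1 == k)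

-- ===== PORT A =====
def rm_smallest (d : List (String × Int)) : List (String × Int) :=
  if d.isEmpty then d
  else
    -- state = (counter, minvalue, minkey); minvalue/minkey start as dummies, set on the first pass
    let st := d.foldl
      (fun (acc : Bool × Int × String) kv =>
        let mv := if acc.1 then kv.2 else acc.2.1
        let mk := if acc.1 then kv.1 else acc.2.2
        if kv.2 < mv then (false, kv.2, kv.1) else (false, mv, mk))
      (true, 0, "")
    pyDictPop d st.2.2

-- ===== PORT B =====
def rm_smallest_alt (d : List (String × Int)) : List (String × Int) :=
  if d.isEmpty then d
  else
    let minkey := ((PySem.List.sorted d (fun kv => kv.2)).headD ("", 0)).1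
    pyDictPop d minkey

-- ===== PRECONDITION & SPEC =====
def Spec_rm_smallest (d : List (String × Int)) (out : List (String × Int)) : Prop := out = rm_smallest_alt d
instance (d : List (String × Int)) (out : List (String × Int)) : Decidable (Spec_rm_smallest d out) := by unfold Spec_rm_smallest; infer_instance

-- ===== CLAIM (what is proved, stated in full; the proofs are below) =====
def Claim_equal_rm_smallest : Prop := ∀ (d : List (String × Int)), Dom_rm_smallest d → Spec_rm_smallest d (rm_smallest d)

-- ===== LEMMAS AND PROOFS =====

-- first pair (in order) achieving the minimal value, starting from b
def bestOf (b : String × Int) (l : List (String × Int)) : String × Int :=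
  l.foldl (fun p kv => if kv.2 < p.2 then kv else p) b

theorem foldA_eq_bestOf (l : List (String × Int)) (b : String × Int) :
    l.foldl
      (fun (acc : Bool × Int × String) kv =>
        let mv := if acc.1 then kv.2 else acc.2.1
        let mk := if acc.1 then kv.1 else acc.2.2
        if kv.2 < mv then (false, kv.2, kv.1) else (false, mv, mk))
      (false, b.2, b.1)
    = (false, (bestOf b l).2, (bestOf b l).1) := by
  induction l generalizing b with
  | nil => simp [bestOf]
  | cons kv t ih =>
    simp only [List.foldl_cons]
    by_cases h : kv.2 < b.2
    · simpa [h, bestOf] using ih kv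
    · simpa [h, bestOf] using ih b

theorem insertBy_ne_nil (before : (String × Int) → (String × Int) → Bool)
    (x : String × Int) (acc : List (String × Int)) :
    PySem.List.insertBy before x acc ≠ [] := by
  cases acc with
  | nil => simp [PySem.List.insertBy]
  | cons a as =>
    simp only [PySem.List.insertBy]
    split <;> simp

theorem head_insertBy (x a : String × Int) (as : List (String × Int)) :
    (PySem.List.insertBy (fun p q => decide (p.2 < q.2)) x (a :: as)).headD ("", 0)
      = if x.2 < a.2 then x else a := by
  simp only [PySem.List.insertBy]
  split <;> simp_all

-- head of the insertion-sort fold tracks bestOf of the current head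
theorem head_sorted_fold (l : List (String × Int)) (acc : List (String × Int)) (hacc : acc ≠ []) :
    (l.foldl (fun acc x => PySem.List.insertBy (fun p q => decide (p.2 < q.2)) x acc)
        acc).headD ("", 0)
      = bestOf (acc.headD ("", 0)) l := by
  induction l generalizing acc with
  | nil => simp [bestOf]
  | cons kv t ih =>
    cases acc with
    | nil => exact absurd rfl hacc
    | cons a as =>
      simp only [List.foldl_cons, bestOf]
      rw [ih _ (insertBy_ne_nil _ _ _)]
      simp only [head_insertBy, bestOf, List.headD_cons]

theorem head_sorted (x : String × Int) (l : List (String × Int)) :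
    ((PySem.List.sorted (x :: l) (fun kv => kv.2)).headD ("", 0)) = bestOf x l := by
  simp only [PySem.List.sorted, List.foldl_cons, Bool.false_eq_true, if_false]
  have h1 : PySem.List.insertBy (fun a b => decide (a.2 < b.2)) x ([] : List (String × Int)) = [x] := by
    simp [PySem.List.insertBy]
  rw [h1, head_sorted_fold l [x] (by simp)]
  simp

-- ===== VERDICT (by name: the statement is the Claim_ definition above) =====
theorem rm_smallest_spec : Claim_equal_rm_smallest := by
  intro d _
  show rm_smallest d = rm_smallest_alt d
  cases d with
  | nil => rfl
  | cons x l =>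
    simp only [rm_smallest, rm_smallest_alt, List.isEmpty_cons, if_neg (by simp : ¬ false = true)]
    rw [head_sorted]
    simp only [List.foldl_cons]
    have h0 := foldA_eq_bestOf l x
    simp [h0]
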